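-- pv_equiv track=rewrite | github.com/yonrasgg/RAICES_VIVAS | 08-Recursos/scripts/fix_frontmatter.py | reorder_blocks
-- ===== SOURCE A (Python) =====
-- def reorder_blocks(blocks, key_order):
--     """Reordena bloques según key_order. Keys no listadas van al final en orden original."""
--     ordered = []
--     remaining = list(blocks)
--
--     for key in key_order:
--         for i, (k, text) in enumerate(remaining):
--             if k == key:
--                 ordered.append((k, text))
--                 remaining.pop(i)
--                 break
--
--     ordered.extend(remaining)
--     return ordered
-- ===== SOURCE B (Python) =====
-- def reorder_blocks(blocks, key_order):
--     """Reordena bloques segun key_order. Keys no listadas van al final en orden original."""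
--     groups = {}
--     for k, text in blocks:
--         groups.setdefault(k, []).append((k, text))
--     ordered = []
--     used = {}
--     for key in key_order:
--         g = groups.get(key, [])
--         c = used.get(key, 0)
--         if c < len(g):
--             ordered.append(g[c])
--             used[key] = c + 1
--     tail = []
--     for k, text in blocks:
--         u = used.get(k, 0)
--         if u > 0:
--             used[k] = u - 1
--         else:
--             tail.append((k, text))
--     return ordered + tail
-- ===== Notes on version B (the rewrite author's own statement) =====
-- stated objective: faster
-- what changed: Replaces the per-key linear scan-and-pop of the remaining list by a single grouping pass (dict key -> list of its blocks), a cursor dict consumed along key_order, and one final pass that skips the consumed occurrences to build the tail.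
import Mathlib
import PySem

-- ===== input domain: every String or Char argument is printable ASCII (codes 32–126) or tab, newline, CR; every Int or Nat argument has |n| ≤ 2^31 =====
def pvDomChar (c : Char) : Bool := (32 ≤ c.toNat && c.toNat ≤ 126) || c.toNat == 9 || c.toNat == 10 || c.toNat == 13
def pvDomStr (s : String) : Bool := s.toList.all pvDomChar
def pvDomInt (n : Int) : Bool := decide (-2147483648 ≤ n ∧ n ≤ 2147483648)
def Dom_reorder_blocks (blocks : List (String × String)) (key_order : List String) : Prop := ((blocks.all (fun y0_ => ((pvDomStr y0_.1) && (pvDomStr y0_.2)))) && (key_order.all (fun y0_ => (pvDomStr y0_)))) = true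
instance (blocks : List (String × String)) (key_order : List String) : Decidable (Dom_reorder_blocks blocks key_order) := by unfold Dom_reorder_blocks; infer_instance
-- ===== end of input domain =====

-- B replaces A's per-key linear scan-and-pop of the remaining list by one grouping pass
-- (dict key -> its blocks), a cursor dict consumed along key_order, and one tail pass;
-- objective: faster (O(n+m) instead of O(n*m)).

-- ===== PORT A =====
-- A's inner loop 'for i, (k, text) in enumerate(remaining): if k == key: ordered.append((k, text)); remaining.pop(i); break'
-- = remove the FIRST block whose key is `key`, returning it and the rest (none = no match, the loop falls through)
def pvExtractFirst (rem : List (String × String)) (key : String) : Option ((String × String) × List (String × String)) :=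
  match rem with
  | [] => none
  | b :: rest =>
    if b.1 == key then some (b, rest)
    else
      match pvExtractFirst rest key with
      | some (f, rest') => some (f, b :: rest')
      | none => none

def reorder_blocks (blocks : List (String × String)) (key_order : List String) : List (String × String) :=
  let st := key_order.foldl
    (fun (st : List (String × String) × List (String × String)) key =>
      match pvExtractFirst st.2 key with
      | some (f, rest) => (st.1 ++ [f], rest)
      | none => st)
    ([], blocks)
  st.1 ++ st.2

-- ===== PORT B =====
def reorder_blocks_alt (blocks : List (String × String)) (key_order : List String) : List (String × String) :=
  -- groups.setdefault(k, []).append((k, text))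
  let groups := blocks.foldl (fun (d : PySem.Dict String (List (String × String))) b =>
      d.modify b.1 [] (· ++ [b])) PySem.Dict.empty
  -- for key in key_order: g = groups.get(key, []); c = used.get(key, 0); if c < len(g): ...
  let st := key_order.foldl
    (fun (st : List (String × String) × PySem.Dict String Int) key =>
      let g := groups.getD key []
      let c := st.2.getD key 0
      if c < (g.length : Int) then
        -- g[c]: in range by the guard (and 0 ≤ c throughout, see proofs), so the default is never used
        (st.1 ++ [PySem.List.pyGetD g c ("", "")], st.2.insert key (c + 1))
      else st)
    ([], PySem.Dict.empty)
  -- tail pass: u = used.get(k, 0); if u > 0: used[k] = u - 1 else: tail.append((k, text))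
  let t := blocks.foldl
    (fun (st : List (String × String) × PySem.Dict String Int) b =>
      let u := st.2.getD b.1 0
      if 0 < u then (st.1, st.2.insert b.1 (u - 1)) else (st.1 ++ [b], st.2))
    ([], st.2)
  st.1 ++ t.1

-- ===== PRECONDITION & SPEC =====
def Spec_reorder_blocks (blocks : List (String × String)) (key_order : List String) (out : List (String × String)) : Prop := out = reorder_blocks_alt blocks key_order
instance (blocks : List (String × String)) (key_order : List String) (out : List (String × String)) : Decidable (Spec_reorder_blocks blocks key_order out) := by unfold Spec_reorder_blocks; infer_instance

-- ===== CLAIM (what is proved, stated in full; the proofs are below) =====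
def Claim_equal_reorder_blocks : Prop := ∀ (blocks : List (String × String)) (key_order : List String), Dom_reorder_blocks blocks key_order → Spec_reorder_blocks blocks key_order (reorder_blocks blocks key_order)

-- ===== LEMMAS AND PROOFS =====

-- the `used` dict read as a Nat-valued count function
def pvCnt (u : PySem.Dict String Int) (k : String) : Nat := (u.getD k 0).toNat

def pvInc (key : String) (cnt : String → Nat) : String → Nat :=
  fun k => if k = key then cnt k + 1 else cnt k

def pvDec (key : String) (cnt : String → Nat) : String → Nat :=
  fun k => if k = key then cnt k - 1 else cnt k

-- blocks with, for each key k, the first (cnt k) k-blocks removed (what B's tail pass emits)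
def pvErase (cnt : String → Nat) : List (String × String) → List (String × String)
  | [] => []
  | b :: bs => if 0 < cnt b.1 then pvErase (pvDec b.1 cnt) bs else b :: pvErase cnt bs

theorem pvErase_zero (cnt : String → Nat) (bs : List (String × String)) (h : ∀ k, cnt k = 0) :
    pvErase cnt bs = bs := by
  induction bs with
  | nil => rfl
  | cons b bs ih => simp [pvErase, h b.1, ih]

theorem pvInc_dec_comm (key j : String) (cnt : String → Nat) (hj : 0 < cnt j) :
    pvInc key (pvDec j cnt) = pvDec j (pvInc key cnt) := by
  funext k
  simp only [pvInc, pvDec]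
  by_cases h2 : k = j
  · subst h2; split_ifs <;> omega
  · simp only [if_neg h2]

theorem pvDec_inc_self (key : String) (cnt : String → Nat) :
    pvDec key (pvInc key cnt) = cnt := by
  funext k
  simp only [pvInc, pvDec]
  by_cases h : k = key <;> simp [h]

-- the crux: extracting the first `key`-block from the partially erased list
theorem pvExtractFirst_pvErase (blocks : List (String × String)) (key : String) :
    ∀ cnt : String → Nat,
    pvExtractFirst (pvErase cnt blocks) key =
      if h : cnt key < (blocks.filter (fun b => b.1 == key)).length
      then some ((blocks.filter (fun b => b.1 == key))[cnt key], pvErase (pvInc key cnt) blocks)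
      else none := by
  induction blocks with
  | nil => intro cnt; simp [pvErase, pvExtractFirst]
  | cons b bs ih =>
    intro cnt
    by_cases hk : b.1 = key
    · subst hk
      have hf : (b :: bs).filter (fun x => x.1 == b.1) = b :: bs.filter (fun x => x.1 == b.1) := by
        simp
      by_cases hc : 0 < cnt b.1
      · have h1 : 0 < pvInc b.1 cnt b.1 := by simp [pvInc]
        rw [show pvErase cnt (b :: bs) = pvErase (pvDec b.1 cnt) bs from by
              simp [pvErase, hc],
            show pvErase (pvInc b.1 cnt) (b :: bs) = pvErase (pvDec b.1 (pvInc b.1 cnt)) bs from by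
              simp [pvErase, h1],
            ih (pvDec b.1 cnt), hf, ← pvInc_dec_comm b.1 b.1 cnt hc]
        have hd : pvDec b.1 cnt b.1 = cnt b.1 - 1 := by simp [pvDec]
        by_cases hlt : cnt b.1 - 1 < (bs.filter (fun x => x.1 == b.1)).length
        · rw [dif_pos (by rw [hd]; exact hlt), dif_pos (by simp; omega)]
          congr 1
          obtain ⟨j, hj⟩ : ∃ j, cnt b.1 = j + 1 := ⟨cnt b.1 - 1, by omega⟩
          have : pvDec b.1 cnt b.1 = j := by rw [hd]; omega
          simp [this, hj]
        · rw [dif_neg (by rw [hd]; exact hlt), dif_neg (by simp; omega)]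
      · have hc0 : cnt b.1 = 0 := by omega
        have h1 : 0 < pvInc b.1 cnt b.1 := by simp [pvInc]
        rw [show pvErase cnt (b :: bs) = b :: pvErase cnt bs from by simp [pvErase, hc],
            show pvErase (pvInc b.1 cnt) (b :: bs) = pvErase (pvDec b.1 (pvInc b.1 cnt)) bs from by
              simp [pvErase, h1],
            pvDec_inc_self, hf, dif_pos (by simp [hc0])]
        simp [pvExtractFirst, hc0]
    · have hbk : (b.1 == key) = false := by simp [hk]
      have hf : (b :: bs).filter (fun x => x.1 == key) = bs.filter (fun x => x.1 == key) := by
        simp [hbk]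
      have hdk : pvDec b.1 cnt key = cnt key := by simp [pvDec, Ne.symm hk]
      have hik : pvInc key cnt b.1 = cnt b.1 := by simp [pvInc, hk]
      by_cases hc : 0 < cnt b.1
      · rw [show pvErase cnt (b :: bs) = pvErase (pvDec b.1 cnt) bs from by simp [pvErase, hc],
            show pvErase (pvInc key cnt) (b :: bs) = pvErase (pvDec b.1 (pvInc key cnt)) bs from by
              simp [pvErase, hik, hc],
            ih (pvDec b.1 cnt), hf, ← pvInc_dec_comm key b.1 cnt hc, hdk]
      · rw [show pvErase cnt (b :: bs) = b :: pvErase cnt bs from by simp [pvErase, hc],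
            show pvErase (pvInc key cnt) (b :: bs) = b :: pvErase (pvInc key cnt) bs from by
              simp [pvErase, hik, hc],
            hf]
        rw [show pvExtractFirst (b :: pvErase cnt bs) key =
              (match pvExtractFirst (pvErase cnt bs) key with
               | some (f, rest') => some (f, b :: rest')
               | none => none) from by simp [pvExtractFirst, hbk],
            ih cnt]
        by_cases hlt : cnt key < (bs.filter (fun x => x.1 == key)).length
        · rw [dif_pos hlt, dif_pos hlt]
        · rw [dif_neg hlt, dif_neg hlt]

-- B's key_order loop (with groups already resolved to filters) vs A's key_order loop
theorem pvLoop_eq (blocks : List (String × String)) (ko : List String) :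
    ∀ (acc : List (String × String)) (u : PySem.Dict String Int), (∀ k, 0 ≤ u.getD k 0) →
    (∀ k, 0 ≤ (ko.foldl
        (fun (st : List (String × String) × PySem.Dict String Int) key =>
          let g := blocks.filter (fun b => b.1 == key)
          let c := st.2.getD key 0
          if c < (g.length : Int) then
            (st.1 ++ [PySem.List.pyGetD g c ("", "")], st.2.insert key (c + 1))
          else st) (acc, u)).2.getD k 0) ∧
    ko.foldl
      (fun (st : List (String × String) × List (String × String)) key =>
        match pvExtractFirst st.2 key with
        | some (f, rest) => (st.1 ++ [f], rest)
        | none => st) (acc, pvErase (pvCnt u) blocks) =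
    ((ko.foldl
        (fun (st : List (String × String) × PySem.Dict String Int) key =>
          let g := blocks.filter (fun b => b.1 == key)
          let c := st.2.getD key 0
          if c < (g.length : Int) then
            (st.1 ++ [PySem.List.pyGetD g c ("", "")], st.2.insert key (c + 1))
          else st) (acc, u)).1,
     pvErase (pvCnt ((ko.foldl
        (fun (st : List (String × String) × PySem.Dict String Int) key =>
          let g := blocks.filter (fun b => b.1 == key)
          let c := st.2.getD key 0
          if c < (g.length : Int) then
            (st.1 ++ [PySem.List.pyGetD g c ("", "")], st.2.insert key (c + 1))
          else st) (acc, u)).2)) blocks) := by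
  induction ko with
  | nil => intro acc u hu; exact ⟨hu, rfl⟩
  | cons key ko ih =>
    intro acc u hu
    simp only [List.foldl_cons]
    have hkey := pvExtractFirst_pvErase blocks key (pvCnt u)
    by_cases hlt : u.getD key 0 < (((blocks.filter (fun b => b.1 == key)).length : Int))
    · have h0 := hu key
      have hnat : pvCnt u key < (blocks.filter (fun b => b.1 == key)).length := by
        simp only [pvCnt]; omega
      rw [dif_pos hnat] at hkey
      have hget : (blocks.filter (fun b => b.1 == key))[pvCnt u key]'hnat
          = PySem.List.pyGetD (blocks.filter (fun b => b.1 == key)) (u.getD key 0) ("", "") := by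
        rw [PySem.List.pyGetD_eq_getElem _ _ h0 hlt]; rfl
      rw [hget] at hkey
      have hu' : ∀ k, 0 ≤ (u.insert key (u.getD key 0 + 1)).getD k 0 := by
        intro k
        rw [PySem.Dict.getD_insert]
        by_cases h : k = key
        · rw [if_pos h]; omega
        · rw [if_neg h]; exact hu k
      have hcnt : pvInc key (pvCnt u) = pvCnt (u.insert key (u.getD key 0 + 1)) := by
        funext k
        simp only [pvCnt, pvInc, PySem.Dict.getD_insert]
        by_cases h : k = key
        · rw [if_pos h, if_pos h, h]; omega
        · rw [if_neg h, if_neg h]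
      rw [hcnt] at hkey
      simp only [hkey, if_pos hlt]
      exact ih (acc ++ [PySem.List.pyGetD (blocks.filter (fun b => b.1 == key)) (u.getD key 0) ("", "")])
        (u.insert key (u.getD key 0 + 1)) hu'
    · have h0 := hu key
      have hnat : ¬ pvCnt u key < (blocks.filter (fun b => b.1 == key)).length := by
        simp only [pvCnt]; omega
      rw [dif_neg hnat] at hkey
      simp only [hkey, if_neg hlt]
      exact ih acc u hu

-- the grouping pass: groups[key] is exactly the key's blocks, in order
theorem pvGroups_getD (blocks : List (String × String)) (key : String) :
    (blocks.foldl (fun (d : PySem.Dict String (List (String × String))) b =>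
        d.modify b.1 [] (· ++ [b])) PySem.Dict.empty).getD key []
      = blocks.filter (fun b => b.1 == key) := by
  have h : blocks.foldl (fun (d : PySem.Dict String (List (String × String))) b =>
        d.modify b.1 [] (· ++ [b])) PySem.Dict.empty
      = (blocks.map (fun b => (b.1, b))).foldl
          (fun (d : PySem.Dict String (List (String × String))) p =>
            d.modify p.1 [] (· ++ [p.2])) PySem.Dict.empty := by
    rw [List.foldl_map]
  rw [h, PySem.Dict.getD_foldl_modify_append]
  simp [List.filter_map, Function.comp_def]

-- the tail pass emits pvErase of the final counts
theorem pvTail_eq (bs : List (String × String)) :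
    ∀ (acc : List (String × String)) (u : PySem.Dict String Int), (∀ k, 0 ≤ u.getD k 0) →
    (bs.foldl
      (fun (st : List (String × String) × PySem.Dict String Int) b =>
        let w := st.2.getD b.1 0
        if 0 < w then (st.1, st.2.insert b.1 (w - 1)) else (st.1 ++ [b], st.2))
      (acc, u)).1 = acc ++ pvErase (pvCnt u) bs := by
  induction bs with
  | nil => intro acc u hu; simp [pvErase]
  | cons b bs ih =>
    intro acc u hu
    simp only [List.foldl_cons]
    by_cases hpos : 0 < u.getD b.1 0
    · have hcp : 0 < pvCnt u b.1 := by simp only [pvCnt]; omega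
      have hu' : ∀ k, 0 ≤ (u.insert b.1 (u.getD b.1 0 - 1)).getD k 0 := by
        intro k
        rw [PySem.Dict.getD_insert]
        by_cases h : k = b.1
        · rw [if_pos h]; omega
        · rw [if_neg h]; exact hu k
      have hcnt : pvCnt (u.insert b.1 (u.getD b.1 0 - 1)) = pvDec b.1 (pvCnt u) := by
        funext k
        simp only [pvCnt, pvDec, PySem.Dict.getD_insert]
        by_cases h : k = b.1
        · rw [if_pos h, if_pos h, h]; omega
        · rw [if_neg h, if_neg h]
      rw [if_pos hpos,
          show pvErase (pvCnt u) (b :: bs) = pvErase (pvDec b.1 (pvCnt u)) bs from by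
            simp [pvErase, hcp],
          ← hcnt]
      exact ih acc (u.insert b.1 (u.getD b.1 0 - 1)) hu'
    · have hcp : ¬ 0 < pvCnt u b.1 := by simp only [pvCnt]; omega
      rw [if_neg hpos,
          show pvErase (pvCnt u) (b :: bs) = b :: pvErase (pvCnt u) bs from by
            simp [pvErase, hcp],
          ih (acc ++ [b]) u hu, List.append_assoc]
      rfl

-- ===== VERDICT (by name: the statement is the Claim_ definition above) =====
theorem reorder_blocks_spec : Claim_equal_reorder_blocks := by
  intro blocks ko _
  show reorder_blocks blocks ko = reorder_blocks_alt blocks ko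
  unfold reorder_blocks reorder_blocks_alt
  simp only []
  simp only [pvGroups_getD]
  have h0 : ∀ k, 0 ≤ (PySem.Dict.empty : PySem.Dict String Int).getD k 0 := by
    intro k; simp [PySem.Dict.getD_empty]
  obtain ⟨hpos, heq⟩ := pvLoop_eq blocks ko [] PySem.Dict.empty h0
  have hbase : pvErase (pvCnt PySem.Dict.empty) blocks = blocks := by
    apply pvErase_zero
    intro k; simp [pvCnt, PySem.Dict.getD_empty]
  rw [hbase] at heq
  rw [heq, pvTail_eq blocks [] _ hpos]
  simp
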